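-- pv_equiv track=rewrite | github.com/leducquangpm/check-gene | check_gene.py | check_pos
-- ===== SOURCE A (Python) =====
-- def check_pos(list_primer_pos,ref_d):
--     #check order
--     for i in range(1,len(list_primer_pos)):
--         if list_primer_pos[i]-list_primer_pos[i-1]<0:
--             return False,'wrong order'
--     #check length
--     d=list_primer_pos[len(list_primer_pos)-1]-list_primer_pos[0]
--     if d<ref_d-50 or d>ref_d+50:
--         return False,'wrong distance'
--     return True,'ok'
-- ===== SOURCE B (Python) =====
-- def check_pos(list_primer_pos, ref_d):
--     # sort-then-compare order test instead of the adjacent-pair scan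
--     if list_primer_pos != sorted(list_primer_pos):
--         return False, 'wrong order'
--     d = list_primer_pos[-1] - list_primer_pos[0]
--     if not (ref_d - 50 <= d <= ref_d + 50):
--         return False, 'wrong distance'
--     return True, 'ok'
-- ===== Notes on version B (the rewrite author's own statement) =====
-- stated objective: simpler
-- what changed: Replaces the explicit index loop over adjacent pairs with a sort-then-compare order test (list == sorted(list)) and a chained-comparison bounds check on last-minus-first.
import Mathlib
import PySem

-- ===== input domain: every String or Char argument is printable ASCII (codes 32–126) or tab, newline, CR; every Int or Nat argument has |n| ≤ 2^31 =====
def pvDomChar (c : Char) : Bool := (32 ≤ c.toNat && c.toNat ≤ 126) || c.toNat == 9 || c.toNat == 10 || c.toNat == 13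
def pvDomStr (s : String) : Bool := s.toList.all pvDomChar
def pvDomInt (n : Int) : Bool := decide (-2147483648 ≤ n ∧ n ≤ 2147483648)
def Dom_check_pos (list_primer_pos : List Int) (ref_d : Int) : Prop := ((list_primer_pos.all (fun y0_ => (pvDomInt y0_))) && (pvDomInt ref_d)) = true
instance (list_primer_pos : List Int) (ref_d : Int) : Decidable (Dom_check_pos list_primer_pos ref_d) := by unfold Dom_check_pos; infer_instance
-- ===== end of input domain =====

-- B replaces A's explicit adjacent-pair index loop by a sort-then-compare order test
-- (list == sorted(list)) and the same last-minus-first distance check; objective: simpler.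

-- ===== PORT A =====
-- the 'for i in range(1, len)' loop with its early return, as a recursion over the index
-- list; indexing is exact here since every i in the range is in bounds (the default of
-- pyGetD is never used)
def check_pos_loop (xs : List Int) : List Int → Option (Bool × String)
  | [] => none
  | i :: rest =>
      if PySem.List.pyGetD xs i 0 - PySem.List.pyGetD xs (i - 1) 0 < 0 then
        some (false, "wrong order")
      else check_pos_loop xs rest

def check_pos (list_primer_pos : List Int) (ref_d : Int) : Bool × String :=
  match check_pos_loop list_primer_pos (PySem.List.pyRange 1 list_primer_pos.length 1) with
  | some r => r
  | none =>
      let d := PySem.List.pyGetD list_primer_pos ((list_primer_pos.length : Int) - 1) 0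
               - PySem.List.pyGetD list_primer_pos 0 0
      if d < ref_d - 50 ∨ d > ref_d + 50 then (false, "wrong distance") else (true, "ok")

-- ===== PORT B =====
def check_pos_alt (list_primer_pos : List Int) (ref_d : Int) : Bool × String :=
  if list_primer_pos ≠ PySem.List.sorted list_primer_pos (fun x => x) false then
    (false, "wrong order")
  else
    let d := PySem.List.pyGetD list_primer_pos (-1) 0 - PySem.List.pyGetD list_primer_pos 0 0
    if ¬ (ref_d - 50 ≤ d ∧ d ≤ ref_d + 50) then (false, "wrong distance") else (true, "ok")

-- ===== PRECONDITION & SPEC =====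
-- Pre_ excludes only the empty list, on which A raises IndexError at list_primer_pos[len-1]
def Pre_check_pos (list_primer_pos : List Int) (ref_d : Int) : Prop :=
  list_primer_pos ≠ []
instance (list_primer_pos : List Int) (ref_d : Int) : Decidable (Pre_check_pos list_primer_pos ref_d) := by unfold Pre_check_pos; infer_instance

def pvWitness_check_pos : List Int × Int := ([3, 10, 40], 40)

def Spec_check_pos (list_primer_pos : List Int) (ref_d : Int) (out : Bool × String) : Prop := out = check_pos_alt list_primer_pos ref_d
instance (list_primer_pos : List Int) (ref_d : Int) (out : Bool × String) : Decidable (Spec_check_pos list_primer_pos ref_d out) := by unfold Spec_check_pos; infer_instance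

-- ===== CLAIM (what is proved, stated in full; the proofs are below) =====
def Claim_equal_check_pos : Prop := ∀ (list_primer_pos : List Int) (ref_d : Int), Dom_check_pos list_primer_pos ref_d → Pre_check_pos list_primer_pos ref_d → Spec_check_pos list_primer_pos ref_d (check_pos list_primer_pos ref_d)

-- ===== LEMMAS AND PROOFS =====

-- A's loop over range(a, len) (1 ≤ a) returns none iff every adjacent pair from index a on is ordered
lemma check_pos_loop_none_iff (xs : List Int) (a : Nat) (ha : 1 ≤ a) :
    check_pos_loop xs (PySem.List.pyRange a xs.length 1) = none ↔
      ∀ i : Nat, a ≤ i → i < xs.length → xs.getD (i - 1) 0 ≤ xs.getD i 0 := by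
  by_cases h : xs.length ≤ a
  · rw [PySem.List.pyRange_one_eq_nil (by exact_mod_cast h)]
    simp only [check_pos_loop]
    constructor
    · intro _ i hai hil; omega
    · intro _; trivial
  · have hal : a < xs.length := by omega
    rw [PySem.List.pyRange_one_cons (by exact_mod_cast hal)]
    simp only [check_pos_loop]
    have hstep : PySem.List.pyGetD xs (a : Int) 0 - PySem.List.pyGetD xs ((a : Int) - 1) 0 < 0 ↔
        ¬ (xs.getD (a - 1) 0 ≤ xs.getD a 0) := by
      have hc1 : ((a : Int) - 1) = ((a - 1 : Nat) : Int) := by omega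
      rw [hc1, PySem.List.pyGetD_natCast, PySem.List.pyGetD_natCast]
      omega
    split_ifs with hc
    · simp only [false_iff]
      intro hall
      exact (hstep.mp hc) (hall a le_rfl hal)
    · have hcast : ((a : Int) + 1) = ((a + 1 : Nat) : Int) := by push_cast; ring
      rw [hcast, check_pos_loop_none_iff xs (a + 1) (by omega)]
      constructor
      · intro hrest i hai hil
        rcases Nat.eq_or_lt_of_le hai with rfl | hlt
        · exact not_not.mp (fun hn => hc (hstep.mpr hn))
        · exact hrest i (by omega) hil
      · intro hall i hai hil; exact hall i (by omega) hil
termination_by xs.length - a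
decreasing_by omega

-- the loop only ever returns none or the 'wrong order' value
lemma check_pos_loop_cases (xs : List Int) (l : List Int) :
    check_pos_loop xs l = none ∨ check_pos_loop xs l = some (false, "wrong order") := by
  induction l with
  | nil => exact Or.inl rfl
  | cons i rest ih =>
    simp only [check_pos_loop]
    split_ifs with hc
    · exact Or.inr rfl
    · exact ih

-- adjacent order over all indices ≥ 1 is exactly IsChain (≤)
lemma adjacent_iff_chain (xs : List Int) :
    (∀ i : Nat, 1 ≤ i → i < xs.length → xs.getD (i - 1) 0 ≤ xs.getD i 0) ↔
      List.IsChain (· ≤ ·) xs := by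
  rw [List.isChain_iff_getElem]
  constructor
  · intro h i hi
    have := h (i + 1) (by omega) (by omega)
    simpa [List.getD_eq_getElem?_getD, List.getElem?_eq_getElem,
      (by omega : i + 1 - 1 = i), (by omega : i + 1 < xs.length), (by omega : i < xs.length)] using this
  · intro h i h1 hil
    have := h (i - 1) (by omega)
    simpa [List.getD_eq_getElem?_getD, List.getElem?_eq_getElem, hil,
      (by omega : i - 1 + 1 = i), (by omega : i - 1 < xs.length)] using this

-- B's test: a list equals its sort iff it is IsChain (≤)
lemma eq_sorted_iff_chain (xs : List Int) :
    xs = PySem.List.sorted xs (fun x => x) false ↔ List.IsChain (· ≤ ·) xs := by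
  rw [List.isChain_iff_pairwise]
  constructor
  · intro h
    have := PySem.List.sorted_pairwise xs (fun x => x)
    rw [← h] at this
    simpa using this
  · intro h
    exact (PySem.List.sorted_eq_self_of_pairwise xs (fun x => x) (by simpa using h)).symm

-- the two indexings of the last element agree on a nonempty list
lemma last_index_eq (xs : List Int) (hne : xs ≠ []) :
    PySem.List.pyGetD xs ((xs.length : Int) - 1) 0 = PySem.List.pyGetD xs (-1) 0 := by
  have hl : 0 < xs.length := List.length_pos_iff.mpr hne
  have h1 : ((xs.length : Int) - 1) = ((xs.length - 1 : Nat) : Int) := by omega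
  rw [h1, PySem.List.pyGetD_natCast, PySem.List.pyGetD_neg_one xs 0 hne]
  rw [List.getD_eq_getElem xs 0 (by omega), List.getLast_eq_getElem]

-- ===== VERDICT (by name: the statement is the Claim_ definition above) =====
theorem check_pos_spec : Claim_equal_check_pos := by
  intro xs ref_d _ hpre
  unfold Spec_check_pos check_pos check_pos_alt
  by_cases hord : List.IsChain (· ≤ ·) xs
  · have hA : check_pos_loop xs (PySem.List.pyRange 1 xs.length 1) = none :=
      (check_pos_loop_none_iff xs 1 le_rfl).mpr ((adjacent_iff_chain xs).mpr hord)
    have hB : ¬ (xs ≠ PySem.List.sorted xs (fun x => x) false) := by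
      simpa using (eq_sorted_iff_chain xs).mpr hord
    rw [hA, if_neg hB]
    simp only [last_index_eq xs hpre]
    set d := PySem.List.pyGetD xs (-1) 0 - PySem.List.pyGetD xs 0 0 with hd
    by_cases hc : d < ref_d - 50 ∨ d > ref_d + 50
    · rw [if_pos hc, if_pos (by omega)]
    · rw [if_neg hc, if_neg (by omega)]
  · have hsome : check_pos_loop xs (PySem.List.pyRange 1 xs.length 1) = some (false, "wrong order") := by
      rcases check_pos_loop_cases xs (PySem.List.pyRange 1 xs.length 1) with hn | hs
      · exact absurd ((adjacent_iff_chain xs).mp ((check_pos_loop_none_iff xs 1 le_rfl).mp hn)) hord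
      · exact hs
    rw [hsome]
    have hB : xs ≠ PySem.List.sorted xs (fun x => x) false :=
      fun h => hord ((eq_sorted_iff_chain xs).mp h)
    rw [if_pos hB]
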